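-- pv_equiv track=rewrite | github.com/ezsx/junior_python_interview | Data_structures_and_algorithms/Leetcode/trapping-rain-water.py | find_water_in_gap
-- ===== SOURCE A (Python) =====
-- def find_water_in_gap(arr):
--     sm = abs(sum(arr) - len(arr))
--     if arr[-1] == 0:
--         for i in arr[::-1]:
--             if i == 0:
--                 sm -= 1
--             else:
--                 break
--     if arr[0] == 0:
--         for i in arr:
--             if i == 0:
--                 sm -= 1
--             else:
--                 break
--     return sm
-- ===== SOURCE B (Python) =====
-- def find_water_in_gap(arr):
--     total = lead = trail = n = 0
--     seen = False
--     for x in arr: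
--         total += x
--         n += 1
--         if x == 0:
--             trail += 1
--             if not seen:
--                 lead += 1
--         else:
--             seen = True
--             trail = 0
--     return abs(total - n) - lead - trail
-- ===== Notes on version B (the rewrite author's own statement) =====
-- stated objective: simpler
-- what changed: B replaces A's three separate scans (sum, reversed trailing-zero scan guarded by the last-element access, leading-zero scan guarded by arr[0]) with one forward pass maintaining sum, length, leading-zero and trailing-zero run counters, then returns abs(total-n)-lead-trail with no guards, since lead/trail are 0 exactly when A's guards fail.
import Mathlib
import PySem

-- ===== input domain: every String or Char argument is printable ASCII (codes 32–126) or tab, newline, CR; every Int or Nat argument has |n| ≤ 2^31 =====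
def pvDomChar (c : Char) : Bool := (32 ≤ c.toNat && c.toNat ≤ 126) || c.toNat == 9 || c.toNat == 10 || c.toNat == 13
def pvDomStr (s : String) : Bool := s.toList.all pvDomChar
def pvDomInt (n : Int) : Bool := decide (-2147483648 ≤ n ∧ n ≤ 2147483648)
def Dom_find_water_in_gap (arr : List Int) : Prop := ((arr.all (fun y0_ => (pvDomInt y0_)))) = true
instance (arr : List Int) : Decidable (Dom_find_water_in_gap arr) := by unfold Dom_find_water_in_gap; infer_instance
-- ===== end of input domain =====

-- B collapses A's three scans into one forward pass with run-length counters; equal return values on nonempty lists (objective: simpler).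

-- ===== PORT A =====
-- 'for i in xs: if i == 0: sm -= 1 else: break'
def zeroSubLoop : List Int → Int → Int
  | [], sm => sm
  | i :: t, sm => if i = 0 then zeroSubLoop t (sm - 1) else sm

def find_water_in_gap (arr : List Int) : Int :=
  let sm := |arr.foldl (· + ·) 0 - (arr.length : Int)|
  -- the last-element access (IndexError on the empty list is excluded by Pre_); default never used under Pre_
  let sm := if PySem.List.pyGetD arr (-1) 0 = 0
            then zeroSubLoop ((PySem.List.slice? arr none none (-1)).getD []) sm  -- arr[::-1]
            else sm
  let sm := if PySem.List.pyGetD arr 0 0 = 0 then zeroSubLoop arr sm else sm      -- arr[0]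
  sm

-- ===== PORT B =====
-- one pass: (total, lead, trail, n, seen)
def altLoop : List Int → Int × Int × Int × Int × Bool → Int × Int × Int × Int × Bool
  | [], st => st
  | x :: t, (total, lead, trail, n, seen) =>
      if x = 0 then
        altLoop t (total + x, (if seen then lead else lead + 1), trail + 1, n + 1, seen)
      else
        altLoop t (total + x, lead, 0, n + 1, true)

def find_water_in_gap_alt (arr : List Int) : Int :=
  let st := altLoop arr (0, 0, 0, 0, false)
  |st.1 - st.2.2.2.1| - st.2.1 - st.2.2.1

-- ===== PRECONDITION & SPEC =====
-- A raises IndexError at its last-element access on the empty list; Pre_ excludes exactly that.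
def Pre_find_water_in_gap (arr : List Int) : Prop := arr ≠ []
instance (arr : List Int) : Decidable (Pre_find_water_in_gap arr) := by
  unfold Pre_find_water_in_gap; infer_instance
def pvWitness_find_water_in_gap : List Int := [0, 1, 0, 0]

def Spec_find_water_in_gap (arr : List Int) (out : Int) : Prop := out = find_water_in_gap_alt arr
instance (arr : List Int) (out : Int) : Decidable (Spec_find_water_in_gap arr out) := by
  unfold Spec_find_water_in_gap; infer_instance

-- ===== CLAIM (what is proved, stated in full; the proofs are below) =====
def Claim_equal_find_water_in_gap : Prop := ∀ (arr : List Int), Dom_find_water_in_gap arr → Pre_find_water_in_gap arr → Spec_find_water_in_gap arr (find_water_in_gap arr)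

-- ===== LEMMAS AND PROOFS =====
-- count of leading zeros
def czl : List Int → Int
  | [] => 0
  | x :: t => if x = 0 then 1 + czl t else 0

theorem zeroSubLoop_eq (xs : List Int) (sm : Int) : zeroSubLoop xs sm = sm - czl xs := by
  induction xs generalizing sm with
  | nil => simp [zeroSubLoop, czl]
  | cons x t ih =>
    by_cases hx : x = 0 <;> simp [zeroSubLoop, czl, hx, ih] <;> ring

theorem foldl_eq_sum (a : Int) (l : List Int) : l.foldl (· + ·) a = a + l.sum := by
  induction l generalizing a with
  | nil => simp
  | cons x t ih => simp only [List.foldl_cons, List.sum_cons, ih (a + x)]; ring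

theorem czl_append (l m : List Int) :
    czl (l ++ m) = if l.all (fun y => y = 0) then (l.length : Int) + czl m else czl l := by
  induction l with
  | nil => simp
  | cons x t ih =>
    by_cases hx : x = 0
    · simp [czl, hx, ih]
      split_ifs <;> push_cast <;> ring
    · simp [czl, hx]

theorem czl_all_zero (xs : List Int) (h : xs.all (fun y => y = 0)) :
    czl xs = (xs.length : Int) := by
  induction xs with
  | nil => simp [czl]
  | cons x t ih =>
    simp_all [czl]
    omega

theorem czl_rev_cons (x : Int) (t : List Int) :
    czl ((x :: t).reverse) =
      if t.all (fun y => y = 0) then (t.length : Int) + czl [x] else czl t.reverse := by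
  have h : (x :: t).reverse = t.reverse ++ [x] := by simp
  rw [h, czl_append, List.all_reverse]
  by_cases ht : t.all (fun y => y = 0) = true
  · simp [ht, czl_all_zero t.reverse (by rw [List.all_reverse]; exact ht)]
  · simp [ht]

theorem altLoop_seen (xs : List Int) (total lead trail n : Int) :
    altLoop xs (total, lead, trail, n, true) =
      (total + xs.sum,
       lead,
       (if xs.all (fun y => y = 0) then trail + xs.length else czl xs.reverse),
       n + xs.length, true) := by
  induction xs generalizing total trail n with
  | nil => simp [altLoop]
  | cons x t ih =>
    by_cases hx : x = 0
    · rw [altLoop, if_pos hx, if_pos rfl, ih, czl_rev_cons]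
      subst hx
      have hc : czl [(0 : Int)] = 1 := by norm_num [czl]
      simp only [List.sum_cons, List.length_cons, List.all_cons, decide_true, Bool.true_and,
        Prod.mk.injEq, hc]
      refine ⟨by ring, trivial, ?_, by push_cast; ring, trivial⟩
      split_ifs <;> push_cast <;> ring
    · rw [altLoop, if_neg hx, ih, czl_rev_cons]
      have hall : ((x :: t).all (fun y => y = 0)) = false := by simp [hx]
      have hc : czl [x] = 0 := by simp [czl, hx]
      simp only [List.sum_cons, List.length_cons, hall, Bool.false_eq_true, if_false,
        Prod.mk.injEq, hc]
      refine ⟨by ring, trivial, ?_, by push_cast; ring, trivial⟩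
      split_ifs <;> push_cast <;> ring

theorem altLoop_unseen (xs : List Int) (total lead trail n : Int) :
    altLoop xs (total, lead, trail, n, false) =
      if xs.all (fun y => y = 0) then
        (total + xs.sum, lead + xs.length, trail + xs.length, n + xs.length, false)
      else
        (total + xs.sum, lead + czl xs, czl xs.reverse, n + xs.length, true) := by
  induction xs generalizing total lead trail n with
  | nil => simp [altLoop]
  | cons x t ih =>
    by_cases hx : x = 0
    · rw [altLoop, if_pos hx, if_neg (by simp), ih]
      subst hx
      by_cases ht : (t.all fun y => decide (y = 0)) = true
      · have hall : ((0 :: t).all fun y => decide (y = 0)) = true := by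
          simpa using ht
        simp only [ht, if_true, hall, List.sum_cons, List.length_cons, Prod.mk.injEq]
        refine ⟨by ring, by push_cast; ring, by push_cast; ring, by push_cast; ring, trivial⟩
      · have hall : ((0 :: t).all fun y => decide (y = 0)) = false := by
          simpa using ht
        have hc : czl ((0 : Int) :: t) = 1 + czl t := by norm_num [czl]
        simp only [ht, hall, Bool.false_eq_true, if_false, List.sum_cons, List.length_cons,
          Prod.mk.injEq, hc, czl_rev_cons]
        refine ⟨by ring, by ring, ?_, by push_cast; ring, trivial⟩
        simp only [decide_eq_true_eq] at ht
        simp [ht]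
    · rw [altLoop, if_neg hx, altLoop_seen, czl_rev_cons]
      have hall : ((x :: t).all fun y => decide (y = 0)) = false := by simp [hx]
      have hc1 : czl (x :: t) = 0 := by simp [czl, hx]
      have hc2 : czl [x] = 0 := by simp [czl, hx]
      simp only [hall, Bool.false_eq_true, if_false, List.sum_cons, List.length_cons,
        Prod.mk.injEq, hc1, hc2]
      refine ⟨by ring, by ring, ?_, by push_cast; ring, trivial⟩
      split_ifs <;> push_cast <;> ring

-- B's closed form on any list
theorem alt_closed (arr : List Int) :
    find_water_in_gap_alt arr =
      |arr.sum - (arr.length : Int)| - czl arr - czl arr.reverse := by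
  unfold find_water_in_gap_alt
  rw [altLoop_unseen]
  by_cases h : arr.all (fun y => y = 0) = true
  · simp only [h, if_true]
    have h1 : czl arr = (arr.length : Int) := czl_all_zero arr h
    have h2 : czl arr.reverse = (arr.length : Int) := by
      rw [czl_all_zero arr.reverse (by rw [List.all_reverse]; exact h)]; simp
    simp only [h1, h2]
    ring_nf
  · simp only [h, Bool.false_eq_true, if_false]
    ring_nf

-- A's closed form on nonempty lists
theorem a_closed (arr : List Int) (h : arr ≠ []) :
    find_water_in_gap arr =
      |arr.sum - (arr.length : Int)| - czl arr - czl arr.reverse := by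
  unfold find_water_in_gap
  rw [PySem.List.slice?_none_none_neg_one]
  simp only [Option.getD_some]
  rw [PySem.List.pyGetD_neg_one arr 0 h, foldl_eq_sum]
  have h0 : PySem.List.pyGetD arr 0 0 = arr.head h := by
    obtain ⟨a, t, rfl⟩ := List.exists_cons_of_ne_nil h
    simp [PySem.List.pyGetD_zero_cons]
  rw [h0]
  have hhead : arr.head h ≠ 0 → czl arr = 0 := by
    intro hne
    obtain ⟨a, t, rfl⟩ := List.exists_cons_of_ne_nil h
    simp_all [czl]
  have hlast : arr.getLast h ≠ 0 → czl arr.reverse = 0 := by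
    intro hne
    have hr : arr.reverse ≠ [] := by simpa using h
    obtain ⟨a, t, heq⟩ := List.exists_cons_of_ne_nil hr
    have ha : a = arr.getLast h := by
      have h1 : arr.reverse.head? = arr.getLast? := List.head?_reverse
      rw [heq, List.getLast?_eq_some_getLast h] at h1
      exact (by simpa using h1.symm : Eq _ _).symm
    rw [heq]; simp [czl, ha, hne]
  by_cases hl : arr.getLast h = 0
  · by_cases hh : arr.head h = 0
    · simp only [if_pos hl, if_pos hh, zeroSubLoop_eq]; simp only [zero_add]; ring
    · simp only [if_pos hl, if_neg hh, zeroSubLoop_eq]; rw [hhead hh]; simp only [zero_add]; ring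
  · by_cases hh : arr.head h = 0
    · simp only [if_neg hl, if_pos hh, zeroSubLoop_eq]; rw [hlast hl]; simp only [zero_add]; ring
    · simp only [if_neg hl, if_neg hh]; rw [hlast hl, hhead hh]; simp only [zero_add]; ring

-- ===== VERDICT (by name: the statement is the Claim_ definition above) =====
theorem find_water_in_gap_spec : Claim_equal_find_water_in_gap := by
  intro arr _ hpre
  unfold Spec_find_water_in_gap
  rw [a_closed arr hpre, alt_closed arr]
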